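-- pv_equiv track=rewrite | github.com/VanessaHanna05/MSD2_PROJECT | generateData/logical_data.py | estimate_soil_recommendation
-- ===== SOURCE A (Python) =====
-- def estimate_soil_recommendation(temp_values, hum_values, rain_values):
--     soil_recommendation = []
--     for temp, hum, rain in zip(temp_values,hum_values,rain_values):
--         if temp < 15 and hum < 45:
--             if rain == "Very Low":
--                 soil_recommendation.append("Low NPK")
--             elif rain == "Low":
--                 soil_recommendation.append("Low NPK")
--             elif rain == "Medium":
--                 soil_recommendation.append("Medium NPK")
--             elif rain == "High":
--                 soil_recommendation.append("Medium NPK")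
--             elif rain == "Very High":
--                 soil_recommendation.append("High NPK")
--
--         elif temp >= 15 and temp < 25 and hum >= 45:
--             if rain == "Very Low":
--                 soil_recommendation.append("Low NPK")
--             elif rain == "Low":
--                 soil_recommendation.append("Low NPK")
--             elif rain == "Medium":
--                 soil_recommendation.append("Medium NPK")
--             elif rain == "High":
--                 soil_recommendation.append("Medium NPK")
--             elif rain == "Very High":
--                 soil_recommendation.append("High NPK")
--
--         elif temp >= 25 and hum < 45:
--             if rain == "Very Low":
--                 soil_recommendation.append("Low NPK")
--             elif rain == "Low":
--                 soil_recommendation.append("Low NPK")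
--             elif rain == "Medium":
--                 soil_recommendation.append("Medium NPK")
--             elif rain == "High":
--                 soil_recommendation.append("Medium NPK")
--             elif rain == "Very High":
--                 soil_recommendation.append("High NPK")
--
--         elif temp < 15 and hum >= 45:
--             if rain == "Very Low":
--                 soil_recommendation.append("Low NPK")
--             elif rain == "Low":
--                 soil_recommendation.append("Low NPK")
--             elif rain == "Medium":
--                 soil_recommendation.append("Medium NPK")
--             elif rain == "High":
--                 soil_recommendation.append("High NPK")
--             elif rain == "Very High":
--                 soil_recommendation.append("High NPK")
--
--         elif temp >= 25 and hum >= 45: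
--             if rain == "Very Low":
--                 soil_recommendation.append("Low NPK")
--             elif rain == "Low":
--                 soil_recommendation.append("Medium NPK")
--             elif rain == "Medium":
--                 soil_recommendation.append("Medium NPK")
--             elif rain == "High":
--                 soil_recommendation.append("High NPK")
--             elif rain == "Very High":
--                 soil_recommendation.append("High NPK")
--
--         elif temp >= 15 and temp < 25 and hum < 45:
--             if rain == "Very Low":
--                 soil_recommendation.append("Low NPK")
--             elif rain == "Low":
--                 soil_recommendation.append("Low NPK")
--             elif rain == "Medium":
--                 soil_recommendation.append("Low NPK")
--             elif rain == "High":
--                 soil_recommendation.append("Medium NPK")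
--             elif rain == "Very High":
--                 soil_recommendation.append("High NPK")
--
--     return soil_recommendation
-- ===== SOURCE B (Python) =====
-- LEVELS = ["Low NPK", "Medium NPK", "High NPK"]
-- RAIN_SCALE = ["Very Low", "Low", "Medium", "High", "Very High"]
--
--
-- def _thresholds(temp, hum):
--     # the two rain-index thresholds at which the NPK level steps up in this climate
--     if hum < 45:
--         return (3, 4) if 15 <= temp < 25 else (2, 4)
--     if temp < 15:
--         return (2, 3)
--     if temp < 25:
--         return (2, 4)
--     return (1, 3)
--
--
-- def estimate_soil_recommendation(temp_values, hum_values, rain_values):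
--     out = []
--     for temp, hum, rain in zip(temp_values, hum_values, rain_values):
--         if rain in RAIN_SCALE:
--             r = RAIN_SCALE.index(rain)
--             t1, t2 = _thresholds(temp, hum)
--             out.append(LEVELS[(r >= t1) + (r >= t2)])
--     return out
-- ===== Notes on version B (the rewrite author's own statement) =====
-- stated objective: simpler
-- what changed: Replaces six copied five-way branch cascades by arithmetic: map the rain string to its index on the ordered scale, count how many of two climate-dependent step-up thresholds that index meets, and use the count to index a three-element level list; unknown rain strings are skipped by a membership guard.
import Mathlib
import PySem

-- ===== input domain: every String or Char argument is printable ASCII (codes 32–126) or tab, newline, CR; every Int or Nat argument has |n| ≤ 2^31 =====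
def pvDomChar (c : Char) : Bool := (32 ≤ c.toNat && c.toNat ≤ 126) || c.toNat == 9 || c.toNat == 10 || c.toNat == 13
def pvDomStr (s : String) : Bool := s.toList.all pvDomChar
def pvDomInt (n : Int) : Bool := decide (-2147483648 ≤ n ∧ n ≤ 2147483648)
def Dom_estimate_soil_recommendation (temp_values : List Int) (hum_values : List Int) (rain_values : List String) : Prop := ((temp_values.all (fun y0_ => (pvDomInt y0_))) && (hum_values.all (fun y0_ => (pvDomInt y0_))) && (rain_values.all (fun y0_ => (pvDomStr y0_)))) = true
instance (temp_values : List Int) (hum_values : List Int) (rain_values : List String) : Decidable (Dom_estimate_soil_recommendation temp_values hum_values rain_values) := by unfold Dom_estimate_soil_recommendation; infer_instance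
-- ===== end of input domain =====

-- B replaces A's six copied five-way rain cascades by arithmetic: the rain string's
-- index on the ordered scale is compared against two climate-dependent thresholds
-- and the count of thresholds met indexes a three-element level list (objective: simpler).

-- ===== PORT A =====
-- the body of A's for-loop (one zipped triple processed against the accumulator)
def pvStepA (acc : List String) : Int × Int × String → List String
  | (temp, hum, rain) =>
  if temp < 15 ∧ hum < 45 then
    if rain = "Very Low" then acc ++ ["Low NPK"]
    else if rain = "Low" then acc ++ ["Low NPK"]
    else if rain = "Medium" then acc ++ ["Medium NPK"]
    else if rain = "High" then acc ++ ["Medium NPK"]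
    else if rain = "Very High" then acc ++ ["High NPK"]
    else acc
  else if temp ≥ 15 ∧ temp < 25 ∧ hum ≥ 45 then
    if rain = "Very Low" then acc ++ ["Low NPK"]
    else if rain = "Low" then acc ++ ["Low NPK"]
    else if rain = "Medium" then acc ++ ["Medium NPK"]
    else if rain = "High" then acc ++ ["Medium NPK"]
    else if rain = "Very High" then acc ++ ["High NPK"]
    else acc
  else if temp ≥ 25 ∧ hum < 45 then
    if rain = "Very Low" then acc ++ ["Low NPK"]
    else if rain = "Low" then acc ++ ["Low NPK"]
    else if rain = "Medium" then acc ++ ["Medium NPK"]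
    else if rain = "High" then acc ++ ["Medium NPK"]
    else if rain = "Very High" then acc ++ ["High NPK"]
    else acc
  else if temp < 15 ∧ hum ≥ 45 then
    if rain = "Very Low" then acc ++ ["Low NPK"]
    else if rain = "Low" then acc ++ ["Low NPK"]
    else if rain = "Medium" then acc ++ ["Medium NPK"]
    else if rain = "High" then acc ++ ["High NPK"]
    else if rain = "Very High" then acc ++ ["High NPK"]
    else acc
  else if temp ≥ 25 ∧ hum ≥ 45 then
    if rain = "Very Low" then acc ++ ["Low NPK"]
    else if rain = "Low" then acc ++ ["Medium NPK"]
    else if rain = "Medium" then acc ++ ["Medium NPK"]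
    else if rain = "High" then acc ++ ["High NPK"]
    else if rain = "Very High" then acc ++ ["High NPK"]
    else acc
  else if temp ≥ 15 ∧ temp < 25 ∧ hum < 45 then
    if rain = "Very Low" then acc ++ ["Low NPK"]
    else if rain = "Low" then acc ++ ["Low NPK"]
    else if rain = "Medium" then acc ++ ["Low NPK"]
    else if rain = "High" then acc ++ ["Medium NPK"]
    else if rain = "Very High" then acc ++ ["High NPK"]
    else acc
  else acc

def estimate_soil_recommendation (temp_values : List Int) (hum_values : List Int) (rain_values : List String) : List String :=
  (temp_values.zip (hum_values.zip rain_values)).foldl pvStepA []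

-- ===== PORT B =====
def pvLevels : List String := ["Low NPK", "Medium NPK", "High NPK"]
def pvRainScale : List String := ["Very Low", "Low", "Medium", "High", "Very High"]

-- the two rain-index thresholds at which the NPK level steps up in this climate
def pvThresholds (temp hum : Int) : Int × Int :=
  if hum < 45 then (if 15 ≤ temp ∧ temp < 25 then (3, 4) else (2, 4))
  else if temp < 15 then (2, 3)
  else if temp < 25 then (2, 4)
  else (1, 3)

-- LEVELS[(r >= t1) + (r >= t2)]; the index is provably 0..2 so the getD default is never used
def pvLvl (t1 t2 i : Int) : String :=
  (PySem.List.pyGet? pvLevels ((if t1 ≤ i then 1 else 0) + (if t2 ≤ i then 1 else 0))).getD ""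

-- the body of B's for-loop
def pvStepB (out : List String) : Int × Int × String → List String
  | (temp, hum, rain) =>
    if rain ∈ pvRainScale then
      match PySem.List.index? pvRainScale rain with
      | some r => out ++ [pvLvl (pvThresholds temp hum).1 (pvThresholds temp hum).2 (r : Int)]
      | none => out
    else out

def estimate_soil_recommendation_alt (temp_values : List Int) (hum_values : List Int) (rain_values : List String) : List String :=
  (temp_values.zip (hum_values.zip rain_values)).foldl pvStepB []

-- ===== PRECONDITION & SPEC =====
def Spec_estimate_soil_recommendation (temp_values : List Int) (hum_values : List Int) (rain_values : List String) (out : List String) : Prop := out = estimate_soil_recommendation_alt temp_values hum_values rain_values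
instance (temp_values : List Int) (hum_values : List Int) (rain_values : List String) (out : List String) : Decidable (Spec_estimate_soil_recommendation temp_values hum_values rain_values out) := by unfold Spec_estimate_soil_recommendation; infer_instance

-- ===== CLAIM =====
def Claim_equal_estimate_soil_recommendation : Prop := ∀ (temp_values : List Int) (hum_values : List Int) (rain_values : List String), Dom_estimate_soil_recommendation temp_values hum_values rain_values → Spec_estimate_soil_recommendation temp_values hum_values rain_values (estimate_soil_recommendation temp_values hum_values rain_values)

-- ===== LEMMAS AND PROOFS =====
-- B's membership-guard + index step unfolded into a five-way cascade over the rain literals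
theorem pvB_cascade (t1 t2 : Int) (out : List String) (rn : String) :
    (if rn ∈ pvRainScale then
       match PySem.List.index? pvRainScale rn with
       | some r => out ++ [pvLvl t1 t2 (r : Int)]
       | none => out
     else out)
    = if rn = "Very Low" then out ++ [pvLvl t1 t2 0]
      else if rn = "Low" then out ++ [pvLvl t1 t2 1]
      else if rn = "Medium" then out ++ [pvLvl t1 t2 2]
      else if rn = "High" then out ++ [pvLvl t1 t2 3]
      else if rn = "Very High" then out ++ [pvLvl t1 t2 4]
      else out := by
  by_cases h0 : rn = "Very Low"
  · subst h0
    rw [if_pos (show "Very Low" ∈ pvRainScale by decide),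
        show PySem.List.index? pvRainScale "Very Low" = some 0 from by decide]
    norm_num
  · rw [if_neg h0]
    by_cases h1 : rn = "Low"
    · subst h1
      rw [if_pos (show "Low" ∈ pvRainScale by decide),
          show PySem.List.index? pvRainScale "Low" = some 1 from by decide]
      norm_num
    · rw [if_neg h1]
      by_cases h2 : rn = "Medium"
      · subst h2
        rw [if_pos (show "Medium" ∈ pvRainScale by decide),
            show PySem.List.index? pvRainScale "Medium" = some 2 from by decide]
        norm_num
      · rw [if_neg h2]
        by_cases h3 : rn = "High"
        · subst h3
          rw [if_pos (show "High" ∈ pvRainScale by decide),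
              show PySem.List.index? pvRainScale "High" = some 3 from by decide]
          norm_num
        · rw [if_neg h3]
          by_cases h4 : rn = "Very High"
          · subst h4
            rw [if_pos (show "Very High" ∈ pvRainScale by decide),
                show PySem.List.index? pvRainScale "Very High" = some 4 from by decide]
            norm_num
          · rw [if_neg h4,
                if_neg (show ¬ rn ∈ pvRainScale by simp [pvRainScale, h0, h1, h2, h3, h4])]

-- the two loop bodies agree on every triple
theorem pv_step_eq (acc : List String) (thr : Int × Int × String) :
    pvStepA acc thr = pvStepB acc thr := by
  obtain ⟨t, h, rn⟩ := thr
  simp only [pvStepA, pvStepB]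
  rw [pvB_cascade]
  rcases lt_or_ge h 45 with h45 | h45 <;> rcases lt_or_ge t 15 with t15 | t15 <;>
    rcases lt_or_ge t 25 with t25 | t25
  · -- t < 15, h < 45: thresholds (2,4)
    rw [show pvThresholds t h = (2, 4) from by simp [pvThresholds, h45]; omega]
    rw [if_pos (show t < 15 ∧ h < 45 from ⟨t15, h45⟩)]
    simp only [show pvLvl 2 4 0 = "Low NPK" from by decide,
      show pvLvl 2 4 1 = "Low NPK" from by decide,
      show pvLvl 2 4 2 = "Medium NPK" from by decide,
      show pvLvl 2 4 3 = "Medium NPK" from by decide,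
      show pvLvl 2 4 4 = "High NPK" from by decide]
  · omega
  · -- 15 ≤ t < 25, h < 45: thresholds (3,4)
    rw [show pvThresholds t h = (3, 4) from by simp [pvThresholds, h45]; omega]
    rw [if_neg (show ¬ (t < 15 ∧ h < 45) by omega),
        if_neg (show ¬ (t ≥ 15 ∧ t < 25 ∧ h ≥ 45) by omega),
        if_neg (show ¬ (t ≥ 25 ∧ h < 45) by omega),
        if_neg (show ¬ (t < 15 ∧ h ≥ 45) by omega),
        if_neg (show ¬ (t ≥ 25 ∧ h ≥ 45) by omega),
        if_pos (show t ≥ 15 ∧ t < 25 ∧ h < 45 by omega)]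
    simp only [show pvLvl 3 4 0 = "Low NPK" from by decide,
      show pvLvl 3 4 1 = "Low NPK" from by decide,
      show pvLvl 3 4 2 = "Low NPK" from by decide,
      show pvLvl 3 4 3 = "Medium NPK" from by decide,
      show pvLvl 3 4 4 = "High NPK" from by decide]
  · -- t ≥ 25, h < 45: thresholds (2,4)
    rw [show pvThresholds t h = (2, 4) from by simp [pvThresholds, h45]; omega]
    rw [if_neg (show ¬ (t < 15 ∧ h < 45) by omega),
        if_neg (show ¬ (t ≥ 15 ∧ t < 25 ∧ h ≥ 45) by omega),
        if_pos (show t ≥ 25 ∧ h < 45 by omega)]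
    simp only [show pvLvl 2 4 0 = "Low NPK" from by decide,
      show pvLvl 2 4 1 = "Low NPK" from by decide,
      show pvLvl 2 4 2 = "Medium NPK" from by decide,
      show pvLvl 2 4 3 = "Medium NPK" from by decide,
      show pvLvl 2 4 4 = "High NPK" from by decide]
  · -- t < 15, h ≥ 45: thresholds (2,3)
    rw [show pvThresholds t h = (2, 3) from by simp [pvThresholds, show ¬ h < 45 by omega, t15]]
    rw [if_neg (show ¬ (t < 15 ∧ h < 45) by omega),
        if_neg (show ¬ (t ≥ 15 ∧ t < 25 ∧ h ≥ 45) by omega),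
        if_neg (show ¬ (t ≥ 25 ∧ h < 45) by omega),
        if_pos (show t < 15 ∧ h ≥ 45 from ⟨t15, h45⟩)]
    simp only [show pvLvl 2 3 0 = "Low NPK" from by decide,
      show pvLvl 2 3 1 = "Low NPK" from by decide,
      show pvLvl 2 3 2 = "Medium NPK" from by decide,
      show pvLvl 2 3 3 = "High NPK" from by decide,
      show pvLvl 2 3 4 = "High NPK" from by decide]
  · omega
  · -- 15 ≤ t < 25, h ≥ 45: thresholds (2,4)
    rw [show pvThresholds t h = (2, 4) from by simp [pvThresholds, show ¬ h < 45 by omega, show ¬ t < 15 by omega, show t < 25 by omega]]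
    rw [if_neg (show ¬ (t < 15 ∧ h < 45) by omega),
        if_pos (show t ≥ 15 ∧ t < 25 ∧ h ≥ 45 by omega)]
    simp only [show pvLvl 2 4 0 = "Low NPK" from by decide,
      show pvLvl 2 4 1 = "Low NPK" from by decide,
      show pvLvl 2 4 2 = "Medium NPK" from by decide,
      show pvLvl 2 4 3 = "Medium NPK" from by decide,
      show pvLvl 2 4 4 = "High NPK" from by decide]
  · -- t ≥ 25, h ≥ 45: thresholds (1,3)
    rw [show pvThresholds t h = (1, 3) from by simp [pvThresholds, show ¬ h < 45 by omega, show ¬ t < 15 by omega, show ¬ t < 25 by omega]]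
    rw [if_neg (show ¬ (t < 15 ∧ h < 45) by omega),
        if_neg (show ¬ (t ≥ 15 ∧ t < 25 ∧ h ≥ 45) by omega),
        if_neg (show ¬ (t ≥ 25 ∧ h < 45) by omega),
        if_neg (show ¬ (t < 15 ∧ h ≥ 45) by omega),
        if_pos (show t ≥ 25 ∧ h ≥ 45 by omega)]
    simp only [show pvLvl 1 3 0 = "Low NPK" from by decide,
      show pvLvl 1 3 1 = "Medium NPK" from by decide,
      show pvLvl 1 3 2 = "Medium NPK" from by decide,
      show pvLvl 1 3 3 = "High NPK" from by decide,
      show pvLvl 1 3 4 = "High NPK" from by decide]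

-- ===== VERDICT =====
theorem estimate_soil_recommendation_spec : Claim_equal_estimate_soil_recommendation := by
  intro tv hv rv _
  unfold Spec_estimate_soil_recommendation estimate_soil_recommendation estimate_soil_recommendation_alt
  rw [funext fun acc => funext fun thr => pv_step_eq acc thr]
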